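-- pv_equiv track=rewrite | github.com/xmaciejson/university | UWr/WDPP 2024/backtracking.py | zroznicowany
-- ===== SOURCE A (Python) =====
-- def zroznicowany(k, n, a):
--     dzielniki = [0] * 10
--     counter = 0
--
--     for i in range(n):
--         reszta = a[i] % 10
--         if dzielniki[reszta] == 0:
--             counter += 1
--             dzielniki[reszta] = 1
--
--         if counter == k:
--             return i + 1
--
--     return 0
-- ===== SOURCE B (Python) =====
-- def zroznicowany(k, n, a):
--     first = {}
--     for i in range(min(n, len(a))):
--         d = a[i] % 10
--         if d not in first:
--             first[d] = i
--     firsts = sorted(first.values())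
--     if 1 <= k <= len(firsts):
--         return firsts[k - 1] + 1
--     return 0
-- ===== Notes on version B (the rewrite author's own statement) =====
-- stated objective: alternative
-- what changed: Replaces the early-return incremental-counter scan with a full pass recording each last-digit's first-occurrence index in a dict, then sorting those indices and picking the (k-1)-th.
-- crash fix: When n > len(a) and a does not contain k distinct last-digits (in particular k <= 0), A raises IndexError at i = len(a); B scans only the available prefix and returns 0. — e.g. on zroznicowany(1, 1, []): A raises IndexError, B returns 0
import Mathlib
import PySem

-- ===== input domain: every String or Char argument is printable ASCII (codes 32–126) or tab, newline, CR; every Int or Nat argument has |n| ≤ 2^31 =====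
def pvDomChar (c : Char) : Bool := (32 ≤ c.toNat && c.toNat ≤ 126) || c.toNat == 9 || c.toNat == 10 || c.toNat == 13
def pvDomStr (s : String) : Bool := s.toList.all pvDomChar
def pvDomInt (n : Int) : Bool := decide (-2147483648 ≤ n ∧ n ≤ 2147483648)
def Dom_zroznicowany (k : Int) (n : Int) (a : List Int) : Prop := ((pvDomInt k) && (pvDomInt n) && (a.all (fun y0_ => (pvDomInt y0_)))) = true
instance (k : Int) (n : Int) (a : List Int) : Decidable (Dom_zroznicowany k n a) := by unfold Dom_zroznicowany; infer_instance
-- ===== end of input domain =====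

-- B replaces A's early-return counter scan by a first-occurrence-index dict plus sort (alternative decomposition, same cost).

-- ===== PORT A =====
def zrLoopA (a : List Int) (k : Int) : List Int → List Int → Int → Int
  | [], _, _ => 0
  | i :: rest, dzielniki, counter =>
    match PySem.List.pyGet? a i with
    | none => 0  -- IndexError: a[i] out of range (outside Pre_)
    | some ai =>
      let reszta := PySem.Int.mod ai 10
      if PySem.List.pyGetD dzielniki reszta 0 = 0 then
        let counter := counter + 1
        let dzielniki := PySem.List.pySetD dzielniki reszta 1
        if counter = k then i + 1 else zrLoopA a k rest dzielniki counter
      else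
        if counter = k then i + 1 else zrLoopA a k rest dzielniki counter

def zroznicowany (k : Int) (n : Int) (a : List Int) : Int :=
  zrLoopA a k (PySem.List.pyRange 0 n 1) (List.replicate 10 0) 0

-- ===== PORT B =====
def zrLoopB (a : List Int) : List Int → PySem.Dict Int Int → PySem.Dict Int Int
  | [], first => first
  | i :: rest, first =>
    let d := PySem.Int.mod (PySem.List.pyGetD a i 0) 10
    zrLoopB a rest (if first.contains d then first else first.insert d i)

def zroznicowany_alt (k : Int) (n : Int) (a : List Int) : Int :=
  let first := zrLoopB a (PySem.List.pyRange 0 (min n (a.length : Int)) 1) PySem.Dict.empty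
  let firsts := PySem.List.sorted first.values (fun x => x) false
  if 1 ≤ k ∧ k ≤ (firsts.length : Int) then PySem.List.pyGetD firsts (k - 1) 0 + 1 else 0

-- ===== PRECONDITION & SPEC =====
-- number of distinct last-digits among the elements of a
def pvDistinct (a : List Int) : Nat := (PySem.Set.ofList (a.map (fun x => PySem.Int.mod x 10))).length

-- Pre_ excludes exactly the inputs on which A raises IndexError: n > len(a) with fewer than k distinct last-digits in a.
def Pre_zroznicowany (k : Int) (n : Int) (a : List Int) : Prop :=
  n ≤ (a.length : Int) ∨ (1 ≤ k ∧ k ≤ (pvDistinct a : Int))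
instance (k : Int) (n : Int) (a : List Int) : Decidable (Pre_zroznicowany k n a) := by unfold Pre_zroznicowany; infer_instance

def pvWitness_zroznicowany : Int × Int × List Int := (2, 3, [1, 12, 5])

-- When n > len(a) and a has fewer than k distinct last-digits (in particular whenever k ≤ 0), A raises IndexError at i = len(a); B scans only the available prefix and returns 0.
def Raises_zroznicowany (k : Int) (n : Int) (a : List Int) : Prop :=
  (a.length : Int) < n ∧ (k < 1 ∨ (pvDistinct a : Int) < k)
instance (k : Int) (n : Int) (a : List Int) : Decidable (Raises_zroznicowany k n a) := by unfold Raises_zroznicowany; infer_instance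
def pvRaiseWitness_zroznicowany : Int × Int × List Int := (1, 1, [])
def pvRaiseWitnessOut_zroznicowany : Int := 0

def Spec_zroznicowany (k : Int) (n : Int) (a : List Int) (out : Int) : Prop := out = zroznicowany_alt k n a
instance (k : Int) (n : Int) (a : List Int) (out : Int) : Decidable (Spec_zroznicowany k n a out) := by unfold Spec_zroznicowany; infer_instance

-- ===== CLAIM (what is proved, stated in full; the proofs are below) =====
def Claim_equal_zroznicowany : Prop := ∀ (k : Int) (n : Int) (a : List Int), Dom_zroznicowany k n a → Pre_zroznicowany k n a → Spec_zroznicowany k n a (zroznicowany k n a)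
def Claim_raises_zroznicowany : Prop := (∀ (k : Int) (n : Int) (a : List Int), Dom_zroznicowany k n a → Raises_zroznicowany k n a → ¬ Pre_zroznicowany k n a) ∧ (Dom_zroznicowany (pvRaiseWitness_zroznicowany.1) (pvRaiseWitness_zroznicowany.2.1) (pvRaiseWitness_zroznicowany.2.2) ∧ Raises_zroznicowany (pvRaiseWitness_zroznicowany.1) (pvRaiseWitness_zroznicowany.2.1) (pvRaiseWitness_zroznicowany.2.2) ∧ zroznicowany_alt (pvRaiseWitness_zroznicowany.1) (pvRaiseWitness_zroznicowany.2.1) (pvRaiseWitness_zroznicowany.2.2) = pvRaiseWitnessOut_zroznicowany)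

-- ===== LEMMAS AND PROOFS =====

theorem zrLoopA_append (a : List Int) (k : Int) (is₁ is₂ : List Int) :
    ∀ dz c, zrLoopA a k is₁ dz c ≠ 0 → zrLoopA a k (is₁ ++ is₂) dz c = zrLoopA a k is₁ dz c := by
  induction is₁ with
  | nil => intro dz c h; simp [zrLoopA] at h
  | cons i rest ih =>
    intro dz c h
    simp only [List.cons_append, zrLoopA] at *
    cases hg : PySem.List.pyGet? a i with
    | none => simp [hg] at h
    | some ai =>
      simp only [hg] at h ⊢
      split_ifs at h ⊢ with h1 h2 h2 <;> first | rfl | exact ih _ _ h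

theorem zrLoopB_values_ext (a : List Int) (is : List Int) :
    ∀ (d : PySem.Dict Int Int), ∃ t, (zrLoopB a is d).values = d.values ++ t ∧ ∀ v ∈ t, v ∈ is := by
  induction is with
  | nil => intro d; exact ⟨[], by simp [zrLoopB]⟩
  | cons i rest ih =>
    intro d
    simp only [zrLoopB]
    set r := PySem.Int.mod (PySem.List.pyGetD a i 0) 10 with hr
    by_cases hc : d.contains r
    · simp only [hc, if_pos]
      obtain ⟨t, ht, hm⟩ := ih d
      exact ⟨t, ht, fun v hv => List.mem_cons_of_mem _ (hm v hv)⟩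
    · simp only [hc, if_neg, Bool.false_eq_true, not_false_iff]
      obtain ⟨t, ht, hm⟩ := ih (d.insert r i)
      refine ⟨i :: t, ?_, ?_⟩
      · rw [ht]
        have : (d.insert r i).values = d.values ++ [i] := by
          simp [PySem.Dict.values, PySem.Dict.items_insert_of_not_contains d i (by simpa using hc)]
        rw [this]; simp
      · intro v hv
        rcases hv with _ | hv
        · exact List.mem_cons_self
        · exact List.mem_cons_of_mem _ (hm v (by assumption))

theorem zrLoopB_keys (a : List Int) (is : List Int) :
    ∀ (d : PySem.Dict Int Int),
    (zrLoopB a is d).keys = PySem.Set.update d.keys (is.map (fun i => PySem.Int.mod (PySem.List.pyGetD a i 0) 10)) := by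
  induction is with
  | nil => intro d; simp [zrLoopB, PySem.Set.update]
  | cons i rest ih =>
    intro d
    simp only [zrLoopB, List.map_cons, PySem.Set.update, List.foldl_cons]
    set r := PySem.Int.mod (PySem.List.pyGetD a i 0) 10 with hr
    have hstep : (if d.contains r then d else d.insert r i).keys = PySem.Set.add d.keys r := by
      by_cases hc : d.contains r
      · simp only [hc, if_pos, PySem.Set.add]
        rw [if_pos (by simpa [PySem.Set.contains] using (PySem.Dict.contains_iff_mem_keys d r).mp hc)]
      · simp only [hc, if_neg, Bool.false_eq_true, not_false_iff, PySem.Set.add]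
        rw [PySem.Dict.keys_insert_of_not_contains d i (by simpa using hc),
          if_neg (by simpa [PySem.Set.contains] using fun h => hc ((PySem.Dict.contains_iff_mem_keys d r).mpr h))]
    rw [ih, hstep]
    rfl

theorem zrLoopB_values_sorted (a : List Int) (is : List Int) :
    ∀ (d : PySem.Dict Int Int),
    d.values.Pairwise (· < ·) → (∀ v ∈ d.values, ∀ i ∈ is, v < i) →
    is.Pairwise (· < ·) → (zrLoopB a is d).values.Pairwise (· < ·) := by
  induction is with
  | nil => intro d h1 _ _; simpa [zrLoopB] using h1
  | cons i rest ih =>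
    intro d h1 h2 h3
    simp only [zrLoopB]
    set r := PySem.Int.mod (PySem.List.pyGetD a i 0) 10 with hr
    rcases List.pairwise_cons.mp h3 with ⟨hi, hrest⟩
    by_cases hc : d.contains r
    · simp only [hc, if_pos]
      exact ih d h1 (fun v hv j hj => h2 v hv j (List.mem_cons_of_mem _ hj)) hrest
    · simp only [hc, if_neg, Bool.false_eq_true, not_false_iff]
      have hv' : (d.insert r i).values = d.values ++ [i] := by
        simp [PySem.Dict.values, PySem.Dict.items_insert_of_not_contains d i (by simpa using hc)]
      apply ih (d.insert r i)
      · rw [hv']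
        refine List.pairwise_append.mpr ⟨h1, List.pairwise_singleton _ _, ?_⟩
        intro v hvv j hj
        simp only [List.mem_singleton] at hj
        rw [hj]
        exact h2 v hvv i List.mem_cons_self
      · intro v hvv j hj
        rw [hv'] at hvv
        rcases List.mem_append.mp hvv with h | h
        · exact h2 v h j (List.mem_cons_of_mem _ hj)
        · simp only [List.mem_singleton] at h; subst h; exact hi j hj
      · exact hrest

theorem dict_values_length {d : PySem.Dict Int Int} : d.values.length = d.size := by
  simp [PySem.Dict.values, PySem.Dict.size]

theorem zrLoop_main (a : List Int) (k : Int) (is : List Int) :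
    ∀ dz c (d : PySem.Dict Int Int),
    (∀ i ∈ is, 0 ≤ i ∧ i < (a.length : Int)) →
    d.keys.Nodup →
    c = (d.size : Int) →
    (c < k ∨ k ≤ 0) →
    (∀ r : Int, 0 ≤ r → r < 10 → (PySem.List.pyGetD dz r 0 = 0 ↔ d.contains r = false)) →
    dz.length = 10 →
    zrLoopA a k is dz c =
      (if 1 ≤ k ∧ k ≤ (((zrLoopB a is d).values.length : Nat) : Int)
       then PySem.List.pyGetD (zrLoopB a is d).values (k - 1) 0 + 1 else 0) := by
  induction is with
  | nil =>
    intro dz c d _ _ hc hck _ _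
    have hlen : d.values.length = d.size := dict_values_length
    simp only [zrLoopA, zrLoopB]
    rw [if_neg]
    rw [hlen]
    omega
  | cons i rest ih =>
    intro dz c d hvalid hnodup hc hck hdz hdzlen
    have hsz : 0 ≤ (d.size : Int) := by positivity
    obtain ⟨hi0, hilen⟩ := hvalid i List.mem_cons_self
    have hget : PySem.List.pyGet? a i = some a[i.toNat] :=
      PySem.List.pyGet?_eq_some_getElem a hi0 hilen
    have hgetD : PySem.List.pyGetD a i 0 = a[i.toNat] :=
      PySem.List.pyGetD_eq_getElem a 0 hi0 hilen
    set r := PySem.Int.mod a[i.toNat] 10 with hrdef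
    have hrmod : r = a[i.toNat] % 10 := PySem.Int.mod_eq_emod_of_pos (by norm_num)
    have hr0 : 0 ≤ r := by rw [hrmod]; exact Int.emod_nonneg _ (by norm_num)
    have hr10 : r < 10 := by rw [hrmod]; exact Int.emod_lt_of_pos _ (by norm_num)
    simp only [zrLoopA, zrLoopB, hget, hgetD]
    rw [← hrdef]
    by_cases hseen : d.contains r = true
    · -- digit already recorded
      have hdz1 : ¬ PySem.List.pyGetD dz r 0 = 0 := by
        intro h0; rw [(hdz r hr0 hr10)] at h0; rw [hseen] at h0; simp at h0
      have hpos : 1 ≤ d.size := by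
        have := (PySem.Dict.contains_iff_mem_keys d r).mp hseen
        have : d.keys ≠ [] := by intro h; rw [h] at this; exact (List.not_mem_nil) this
        have : 0 < d.keys.length := List.length_pos_iff.mpr this
        simpa [PySem.Dict.keys, PySem.Dict.size] using this
      have hck' : ¬ c = k := by omega
      rw [if_neg hdz1, if_neg hck', if_pos hseen]
      exact ih dz c d (fun j hj => hvalid j (List.mem_cons_of_mem _ hj)) hnodup hc hck hdz hdzlen
    · -- new digit
      have hseen' : d.contains r = false := by simpa using hseen
      have hdz0 : PySem.List.pyGetD dz r 0 = 0 := (hdz r hr0 hr10).mpr hseen'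
      rw [if_pos hdz0, if_neg hseen]
      have hvins : (d.insert r i).values = d.values ++ [i] := by
        simp [PySem.Dict.values, PySem.Dict.items_insert_of_not_contains d i hseen']
      by_cases hkc : c + 1 = k
      · -- A returns here
        rw [if_pos hkc]
        obtain ⟨t, ht, _⟩ := zrLoopB_values_ext a rest (d.insert r i)
        rw [ht, hvins]
        have hvl : d.values.length = d.size := dict_values_length
        have hk1 : k - 1 = ((d.values.length : Nat) : Int) := by rw [hvl]; omega
        rw [if_pos, hk1, PySem.List.pyGetD_natCast]
        · have : (d.values ++ [i] ++ t).getD d.values.length 0 = i := by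
            rw [List.append_assoc, List.getD, List.getElem?_append_right (le_refl _)]
            simp
          rw [this]
        · constructor
          · omega
          · rw [List.length_append, List.length_append]
            simp only [List.length_singleton]
            push_cast
            omega
      · -- A continues
        rw [if_neg hkc]
        apply ih (PySem.List.pySetD dz r 1) (c + 1) (d.insert r i)
          (fun j hj => hvalid j (List.mem_cons_of_mem _ hj))
          (PySem.Dict.nodup_keys_insert d r i hnodup)
        · rw [PySem.Dict.size_insert]
          rw [if_neg (by rw [hseen']; exact Bool.false_ne_true)]
          push_cast
          omega
        · omega
        · intro r' hr'0 hr'10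
          rw [PySem.Dict.contains_insert]
          have hcast : ((r.toNat : Nat) : Int) = r := Int.toNat_of_nonneg hr0
          have hcast' : ((r'.toNat : Nat) : Int) = r' := Int.toNat_of_nonneg hr'0
          rw [← hcast, ← hcast',
            PySem.List.pyGetD_pySetD_natCast dz r.toNat r'.toNat 1 0 (by omega)]
          by_cases hrr : r' = r
          · rw [if_pos (by omega)]
            simp [hcast, hrr]
          · rw [if_neg (by omega)]
            simp [hcast, hcast', hrr, hdz r' hr'0 hr'10]
        · rw [PySem.List.length_pySetD]; exact hdzlen

theorem zr_eq_aux (a : List Int) (k m : Int) (hm : m ≤ (a.length : Int)) :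
    zrLoopA a k (PySem.List.pyRange 0 m 1) (List.replicate 10 0) 0 =
      (if 1 ≤ k ∧ k ≤ (((zrLoopB a (PySem.List.pyRange 0 m 1) PySem.Dict.empty).values.length : Nat) : Int)
       then PySem.List.pyGetD (zrLoopB a (PySem.List.pyRange 0 m 1) PySem.Dict.empty).values (k - 1) 0 + 1 else 0) := by
  apply zrLoop_main
  · intro i hi
    rw [PySem.List.mem_pyRange_one] at hi
    omega
  · rw [PySem.Dict.keys_empty]; exact List.nodup_nil
  · rw [PySem.Dict.size_empty]; rfl
  · omega
  · intro r hr0 hr10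
    rw [PySem.Dict.contains_empty]
    have hg : PySem.List.pyGetD (List.replicate 10 (0 : Int)) r 0 = 0 := by
      rw [PySem.List.pyGetD_eq_getElem _ 0 hr0 (by simp; omega)]
      apply List.getElem_replicate
    rw [hg]
    simp
  · simp

theorem zr_sorted_id (a : List Int) (m : Int) :
    PySem.List.sorted (zrLoopB a (PySem.List.pyRange 0 m 1) PySem.Dict.empty).values (fun x => x) false =
      (zrLoopB a (PySem.List.pyRange 0 m 1) PySem.Dict.empty).values := by
  apply PySem.List.sorted_eq_self_of_pairwise
  apply List.Pairwise.imp (fun h => le_of_lt h)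
  apply zrLoopB_values_sorted a _ PySem.Dict.empty
  · simp [PySem.Dict.values, PySem.Dict.empty]
  · simp [PySem.Dict.values, PySem.Dict.empty]
  · exact PySem.List.pairwise_lt_pyRange_one 0 m

theorem zr_values_len (a : List Int) :
    ((zrLoopB a (PySem.List.pyRange 0 (a.length : Int) 1) PySem.Dict.empty).values.length) = pvDistinct a := by
  have hk := zrLoopB_keys a (PySem.List.pyRange 0 (a.length : Int) 1) PySem.Dict.empty
  have hmap : (PySem.List.pyRange 0 (a.length : Int) 1).map
      (fun i => PySem.Int.mod (PySem.List.pyGetD a i 0) 10) = a.map (fun x => PySem.Int.mod x 10) := by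
    have h2 : (PySem.List.pyRange 0 (a.length : Int) 1).map (fun j => PySem.List.pyGetD a j 0) = a :=
      PySem.List.map_pyGetD_pyRange_zero a (0 : Int)
    have h3 : a.map (fun x => PySem.Int.mod x 10) =
        ((PySem.List.pyRange 0 (a.length : Int) 1).map
          (fun j => PySem.List.pyGetD a j 0)).map (fun x => PySem.Int.mod x 10) := by rw [h2]
    rw [List.map_map] at h3
    exact h3.symm
  rw [PySem.Dict.keys_empty] at hk
  have hvk : (zrLoopB a (PySem.List.pyRange 0 (a.length : Int) 1) PySem.Dict.empty).values.length
      = (zrLoopB a (PySem.List.pyRange 0 (a.length : Int) 1) PySem.Dict.empty).keys.length := by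
    simp [PySem.Dict.values, PySem.Dict.keys]
  rw [hvk, hk, hmap]
  unfold pvDistinct
  rw [PySem.Set.ofList_eq_foldl]
  rfl

theorem zr_top (k n : Int) (a : List Int) (hpre : Pre_zroznicowany k n a) :
    zroznicowany k n a = zroznicowany_alt k n a := by
  unfold zroznicowany zroznicowany_alt
  simp only
  rw [zr_sorted_id]
  by_cases hn : n ≤ (a.length : Int)
  · rw [min_eq_left hn]
    exact zr_eq_aux a k n hn
  · have hlen : (a.length : Int) < n := by omega
    have hk : 1 ≤ k ∧ k ≤ (pvDistinct a : Int) := by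
      rcases hpre with h | h
      · omega
      · exact h
    rw [min_eq_right (le_of_lt hlen)]
    have hguard : 1 ≤ k ∧ k ≤
        (((zrLoopB a (PySem.List.pyRange 0 (a.length : Int) 1) PySem.Dict.empty).values.length : Nat) : Int) := by
      rw [zr_values_len]
      exact hk
    have hA1 := zr_eq_aux a k (a.length : Int) (le_refl _)
    have hnonneg : 0 ≤ PySem.List.pyGetD
        (zrLoopB a (PySem.List.pyRange 0 (a.length : Int) 1) PySem.Dict.empty).values (k - 1) 0 := by
      obtain ⟨t, ht, hmem⟩ := zrLoopB_values_ext a (PySem.List.pyRange 0 (a.length : Int) 1) PySem.Dict.empty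
      have hempty : (PySem.Dict.empty : PySem.Dict Int Int).values = [] := by
        simp [PySem.Dict.values, PySem.Dict.empty]
      rw [hempty, List.nil_append] at ht
      have hlen : ((zrLoopB a (PySem.List.pyRange 0 (a.length : Int) 1) PySem.Dict.empty).values.length : Int)
          = (t.length : Int) := by rw [ht]
      have hmem2 := PySem.List.pyGetD_mem t (i := k - 1) (0 : Int) ⟨by omega, by omega⟩
      have hmem3 := hmem _ hmem2
      rw [PySem.List.mem_pyRange_one] at hmem3
      rw [ht]
      omega
    have hEne : zrLoopA a k (PySem.List.pyRange 0 (a.length : Int) 1) (List.replicate 10 0) 0 ≠ 0 := by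
      rw [hA1, if_pos hguard]
      omega
    rw [PySem.List.pyRange_one_append 0 (a.length : Int) n (by positivity) (le_of_lt hlen)]
    rw [zrLoopA_append a k _ _ _ _ hEne]
    exact hA1

-- ===== VERDICT (by name: the statement is the Claim_ definition above) =====
theorem zroznicowany_spec : Claim_equal_zroznicowany := by
  intro k n a _ hpre
  unfold Spec_zroznicowany
  exact zr_top k n a hpre

@[simp] theorem zroznicowany_raises : Claim_raises_zroznicowany := by
  unfold Claim_raises_zroznicowany
  constructor
  · intro k n a _ hr hp
    rcases hr with ⟨h1, h2⟩
    rcases hp with h | ⟨h3, h4⟩ <;> omega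
  · exact ⟨by decide, by decide, by decide⟩
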